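-- pv_equiv track=rewrite | github.com/yz4004/codeforce-python | daily/problem_list/2025/0924.py | solve
-- ===== SOURCE A (Python) =====
-- from collections import deque
--
-- MOD = 998244353
--
-- def solve(n, pa):
--
--     g = [[] for _ in range(n)]
--     for i,p in enumerate(pa, 1): # 节点 2..n 的父亲
--         g[p-1].append(i)
--
--     # 迭代 BFS 分层：levels[d] = 深度 d 的节点列表（节点用 0-index 存）
--     levels = []
--     q = deque([0])
--     while q:
--         size = len(q)
--         cur = []
--         for _ in range(size):
--             u = q.popleft()
--             cur.append(u)
--             for v in g[u]:
--                 q.append(v)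
--         levels.append(cur)
--     m = len(levels)
--
--     # f[i] 必选i 子树的方案
--     f = [0] * n
--     # 只有深度 >= 1 的 f[u] 才有意义；叶子（深度>=1）初始为 1
--     for u in levels[m-1]:
--         if u != 0:
--             f[u] = 1
--
--     t = 0
--     for l in range(m-2, 0, -1):
--
--         total_next = 0
--         for v in levels[l+1]:
--             total_next = (total_next + f[v]) % MOD
--
--         # t += sum(f[x] for x in levels[l+1]) % MOD  += 累计 允许跳层
--         # 题目要求每层必须有一个人，b序列应该是前缀 而不是
--
--         # 本层每个点：1 + (下一层总 - 子女和)
--         for u in levels[l]: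
--             # 允许停在 u：+1
--             val = 1
--             # 加上跨到下一层非子女的续选
--             sum_children = 0
--             for v in g[u]:
--                 sum_children = (sum_children + f[v]) % MOD
--             val = (val + (total_next - sum_children)) % MOD
--             f[u] = val
--
--     # 根层（深度 0）：首跳不受限制
--     ans = 1  # 只选根
--     if m >= 2:
--         for v in levels[1]:
--             ans = (ans + f[v]) % MOD
--     return ans % MOD
-- ===== SOURCE B (Python) =====
-- MOD = 998244353
--
-- def solve(n, pa):
--     g = [[] for _ in range(n)]
--     for i, p in enumerate(pa, 1):
--         g[p-1].append(i)
--     # level-order traversal keeping only the node count per depth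
--     cnt = []
--     q = [0]
--     while q:
--         cnt.append(len(q))
--         q = [v for u in q for v in g[u]]
--     m = len(cnt)
--     if m < 2:
--         return 1
--     # scalar recurrence on per-level sums, deepest level first
--     s = cnt[m-1] % MOD
--     for l in range(m-2, 0, -1):
--         s = (cnt[l] + (cnt[l] - 1) * s) % MOD
--     return (1 + s) % MOD
-- ===== Notes on version B (the rewrite author's own statement) =====
-- stated objective: simpler
-- what changed: Replaces the per-node DP array f over BFS layers (inner loops summing children per node) by a single scalar recurrence on per-depth node counts, S = (cnt[l] + (cnt[l]-1)*S) % MOD, because each layer's sum of f-values telescopes.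
-- outside the precondition, e.g. on solve(2, [2, 2]): A returns 1, B returns 1
import Mathlib
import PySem

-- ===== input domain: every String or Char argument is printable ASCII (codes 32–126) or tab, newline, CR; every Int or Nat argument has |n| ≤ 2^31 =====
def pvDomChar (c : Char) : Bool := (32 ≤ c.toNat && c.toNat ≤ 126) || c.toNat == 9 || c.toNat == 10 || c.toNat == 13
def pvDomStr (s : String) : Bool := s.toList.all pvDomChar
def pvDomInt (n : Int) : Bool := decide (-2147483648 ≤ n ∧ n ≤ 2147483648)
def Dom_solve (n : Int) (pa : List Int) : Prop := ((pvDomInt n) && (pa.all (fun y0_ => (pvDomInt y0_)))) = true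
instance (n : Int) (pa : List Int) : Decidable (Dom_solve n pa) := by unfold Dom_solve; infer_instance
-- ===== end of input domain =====

-- B replaces A's per-node DP array over BFS layers by a scalar recurrence on per-depth
-- node counts (objective: simpler); same return value on every input admitted by Pre_solve.

def MODL : Int := 998244353

-- g[u], a list of children node indices (shared Python idiom `g[u]`; exact for -len ≤ u < len)
def chD (g : List (List Int)) (u : Int) : List Int := PySem.List.pyGetD g u []

-- ===== PORT A =====
-- g = [[] for _ in range(n)]; for i, p in enumerate(pa, 1): g[p-1].append(i)
def buildG (n : Int) (pa : List Int) : List (List Int) :=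
  (PySem.List.enumerate pa 1).foldl
    (fun g ip =>
      PySem.List.pySetD g (ip.2 - 1) (PySem.List.pyGetD g (ip.2 - 1) [] ++ [ip.1]))
    (List.replicate n.toNat [])

-- the while-q BFS of A: each round records cur (= the current deque) and refills q with all
-- children; fuel n.toNat bounds the rounds (each round consumes ≥1 of the n distinct nodes)
def bfsLevels (g : List (List Int)) : Nat → List Int → List (List Int)
  | 0, _ => []
  | _ + 1, [] => []
  | fuel + 1, u :: q =>
      (u :: q) :: bfsLevels g fuel ((u :: q).flatMap (fun w => chD g w))

def solve (n : Int) (pa : List Int) : Int :=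
  let g := buildG n pa
  let levels := bfsLevels g n.toNat [0]
  let m : Int := PySem.List.len levels
  let f0 : List Int := List.replicate n.toNat 0
  let f1 := (PySem.List.pyGetD levels (m - 1) []).foldl
      (fun f u => if u ≠ 0 then PySem.List.pySetD f u 1 else f) f0
  let f2 := (PySem.List.pyRange (m - 2) 0 (-1)).foldl
      (fun f l =>
        let totalNext := (PySem.List.pyGetD levels (l + 1) []).foldl
            (fun acc v => PySem.Int.mod (acc + PySem.List.pyGetD f v 0) MODL) 0
        (PySem.List.pyGetD levels l []).foldl
          (fun f u =>
            let sumChildren := (chD g u).foldl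
                (fun acc v => PySem.Int.mod (acc + PySem.List.pyGetD f v 0) MODL) 0
            PySem.List.pySetD f u (PySem.Int.mod (1 + (totalNext - sumChildren)) MODL))
          f)
      f1
  let ans := if 2 ≤ m then
      (PySem.List.pyGetD levels 1 []).foldl
        (fun a v => PySem.Int.mod (a + PySem.List.pyGetD f2 v 0) MODL) 1
    else 1
  PySem.Int.mod ans MODL

-- ===== PORT B =====
def mkGraph (n : Int) (pa : List Int) : List (List Int) :=
  (PySem.List.enumerate pa 1).foldl
    (fun g ip =>
      PySem.List.pySetD g (ip.2 - 1) (PySem.List.pyGetD g (ip.2 - 1) [] ++ [ip.1]))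
    (List.replicate n.toNat [])

-- B's level loop: cnt.append(len(q)); q = [v for u in q for v in g[u]]
def levelCounts (g : List (List Int)) : Nat → List Int → List Int
  | 0, _ => []
  | _ + 1, [] => []
  | fuel + 1, u :: q =>
      PySem.List.len (u :: q) :: levelCounts g fuel ((u :: q).flatMap (fun w => chD g w))

def solve_alt (n : Int) (pa : List Int) : Int :=
  let g := mkGraph n pa
  let cnt := levelCounts g n.toNat [0]
  let m : Int := PySem.List.len cnt
  if m < 2 then 1
  else
    let s := (PySem.List.pyRange (m - 2) 0 (-1)).foldl
        (fun s l =>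
          let c := PySem.List.pyGetD cnt l 0
          PySem.Int.mod (c + (c - 1) * s) MODL)
        (PySem.Int.mod (PySem.List.pyGetD cnt (m - 1) 0) MODL)
    PySem.Int.mod (1 + s) MODL

-- ===== PRECONDITION & SPEC =====
-- Pre_solve keeps the natural domain: n ≥ 1, at most n-1 parent entries, each a valid Python
-- index p-1 into g (so 1-n ≤ p ≤ n; negative p wraps around, which A accepts and B matches).
-- It excludes inputs where A raises IndexError (n ≤ 0 or a parent index out of range), and
-- also every input with len(pa) > n-1: there A raises unless each out-of-range node happens
-- to be unreachable from the root, which is not a closed-form shape (A returns e.g. on (2,[2,2])).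
def Pre_solve (n : Int) (pa : List Int) : Prop :=
  1 ≤ n ∧ (pa.length : Int) ≤ n - 1 ∧ ∀ p ∈ pa, 1 - n ≤ p ∧ p ≤ n
instance (n : Int) (pa : List Int) : Decidable (Pre_solve n pa) := by
  unfold Pre_solve; infer_instance

def pvWitness_solve : Int × List Int := (5, [1, 1, 2, 2])

def Spec_solve (n : Int) (pa : List Int) (out : Int) : Prop := out = solve_alt n pa
instance (n : Int) (pa : List Int) (out : Int) : Decidable (Spec_solve n pa out) := by
  unfold Spec_solve; infer_instance

-- ===== CLAIM (what is proved, stated in full; the proofs are below) =====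
def Claim_equal_solve : Prop :=
  ∀ (n : Int) (pa : List Int), Dom_solve n pa → Pre_solve n pa → Spec_solve n pa (solve n pa)

-- ===== LEMMAS AND PROOFS =====

-- f[v] read with default (all reads in the programs are in range under Pre_solve)
def getf (f : List Int) (v : Int) : Int := PySem.List.pyGetD f v 0

-- the per-node value A's array holds at a level, defined down the list of deeper levels
def HF (g : List (List Int)) : List (List Int) → Int → Int
  | [], _ => 1
  | [_], _ => 1
  | _ :: next :: rest, u =>
      (1 + ((next.map (HF g (next :: rest))).sum % MODL
            - ((chD g u).map (HF g (next :: rest))).sum % MODL)) % MODL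

lemma modM (x : Int) : PySem.Int.mod x MODL = x % MODL :=
  PySem.Int.mod_eq_emod_of_pos (by decide)

-- normalized Python index
def nIdx (len : Nat) (i : Int) : Nat := if 0 ≤ i then i.toNat else len - (-i).toNat

lemma nIdx_lt (len : Nat) (i : Int) (h : PySem.Raise.InRange len i) : nIdx len i < len := by
  rcases h with ⟨h1, h2⟩
  unfold nIdx
  split <;> omega

lemma pyGetD_norm {α : Type} (xs : List α) (i : Int) (d : α)
    (h : PySem.Raise.InRange xs.length i) :
    PySem.List.pyGetD xs i d = xs.getD (nIdx xs.length i) d := by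
  rcases h with ⟨h1, h2⟩
  simp only [PySem.List.pyGetD, PySem.List.pyGet?, PySem.List.pyIdx?, nIdx,
    List.getD_eq_getElem?_getD]
  split_ifs <;> simp_all

lemma pySetD_norm {α : Type} (xs : List α) (i : Int) (v : α)
    (h : PySem.Raise.InRange xs.length i) :
    PySem.List.pySetD xs i v = xs.set (nIdx xs.length i) v := by
  rcases h with ⟨h1, h2⟩
  simp only [PySem.List.pySetD, PySem.List.pySet?, PySem.List.pyIdx?, nIdx]
  split_ifs <;> simp_all

lemma getf_eq_getElem? (f : List Int) (v : Int) (h0 : 0 ≤ v) : getf f v = f[v.toNat]?.getD 0 := by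
  rw [getf, PySem.List.pyGetD, PySem.List.pyGet?_of_nonneg f h0]

lemma chD_nonneg (g : List (List Int)) (u : Int) (h0 : 0 ≤ u) (h1 : u < (g.length : Int)) :
    chD g u = g[u.toNat]'(by omega) := by
  have := pyGetD_norm g u [] ⟨by omega, h1⟩
  rw [chD, this]
  unfold nIdx
  simp only [if_pos h0, List.getD_eq_getElem?_getD]
  rw [List.getElem?_eq_getElem (by omega)]
  rfl

-- ---- facts about g ----

lemma buildG_length (n : Int) (pa : List Int) : (buildG n pa).length = n.toNat := by
  unfold buildG
  generalize PySem.List.enumerate pa 1 = l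
  have : ∀ (l : List (Int × Int)) (g : List (List Int)),
      (l.foldl (fun g ip =>
        PySem.List.pySetD g (ip.2 - 1) (PySem.List.pyGetD g (ip.2 - 1) [] ++ [ip.1])) g).length
        = g.length := by
    intro l
    induction l with
    | nil => intro g; rfl
    | cons x t ih =>
      intro g
      rw [List.foldl_cons, ih, PySem.List.length_pySetD]
  rw [this, List.length_replicate]

lemma flatten_set_append (g : List (List Int)) (k : Nat) (x : Int) (hk : k < g.length) :
    (g.set k (g[k] ++ [x])).flatten.Perm (g.flatten ++ [x]) := by
  induction g generalizing k with
  | nil => simp at hk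
  | cons h t ih =>
    rcases k with _ | k
    · simp only [List.set_cons_zero, List.getElem_cons_zero, List.flatten_cons,
        List.append_assoc]
      exact List.Perm.append_left h List.perm_append_comm
    · simp only [List.set_cons_succ, List.flatten_cons, List.getElem_cons_succ,
        List.append_assoc]
      exact List.Perm.append_left h (ih k (by simpa using hk))

lemma buildG_flatten_perm (n : Int) (pa : List Int) (hpre : Pre_solve n pa) :
    (buildG n pa).flatten.Perm ((List.range pa.length).map (fun k : Nat => (k : Int) + 1)) := by
  obtain ⟨hn, hlen, hp⟩ := hpre
  have main : ∀ (rest : List Int) (s0 : Int) (g : List (List Int)),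
      (∀ p ∈ rest, PySem.Raise.InRange g.length (p - 1)) →
      ((PySem.List.enumerate rest s0).foldl
          (fun g ip =>
            PySem.List.pySetD g (ip.2 - 1) (PySem.List.pyGetD g (ip.2 - 1) [] ++ [ip.1]))
          g).flatten.Perm
        (g.flatten ++ (List.range rest.length).map (fun k : Nat => s0 + (k : Int))) := by
    intro rest
    induction rest with
    | nil => intro s0 g _; simp
    | cons p rest ih =>
      intro s0 g hin
      have hpr : PySem.Raise.InRange g.length (p - 1) := hin p (by simp)
      have hj : nIdx g.length (p - 1) < g.length := nIdx_lt _ _ hpr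
      have hset : PySem.List.pySetD g (p - 1) (PySem.List.pyGetD g (p - 1) [] ++ [s0])
          = g.set (nIdx g.length (p - 1)) (g[nIdx g.length (p - 1)] ++ [s0]) := by
        rw [pySetD_norm _ _ _ hpr, pyGetD_norm _ _ _ hpr, List.getD_eq_getElem?_getD,
          List.getElem?_eq_getElem hj]
        rfl
      have hstep := flatten_set_append g (nIdx g.length (p - 1)) s0 hj
      simp only [PySem.List.enumerate, List.foldl_cons]
      have ihh := ih (s0 + 1)
          (g.set (nIdx g.length (p - 1)) (g[nIdx g.length (p - 1)] ++ [s0]))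
          (by intro p' hp'
              have := hin p' (by simp [hp'])
              simpa using this)
      rw [hset]
      refine ihh.trans ?_
      refine (hstep.append_right
          ((List.range rest.length).map (fun k : Nat => s0 + 1 + (k : Int)))).trans ?_
      apply List.Perm.of_eq
      rw [List.length_cons, List.range_succ_eq_map, List.map_cons, List.map_map,
        List.append_assoc]
      simp only [Function.comp_def]
      refine congrArg₂ _ rfl ?_
      refine congrArg₂ List.cons (by ring) ?_
      apply List.map_congr_left
      intro x hx
      push_cast
      ring
  have hrep : ∀ (m : Nat), (List.replicate m ([] : List Int)).flatten = [] := by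
    intro m
    simp
  have := main pa 1 (List.replicate n.toNat [])
      (by intro p hp'
          have := hp p hp'
          constructor <;> · simp only [List.length_replicate]; omega)
  unfold buildG
  refine this.trans ?_
  apply List.Perm.of_eq
  rw [hrep]
  simp only [List.nil_append]
  apply List.map_congr_left
  intro x hx
  ring

lemma buildG_flatten_nodup (n : Int) (pa : List Int) (hpre : Pre_solve n pa) :
    (buildG n pa).flatten.Nodup := by
  refine (buildG_flatten_perm n pa hpre).symm.nodup ?_
  refine List.Nodup.map ?_ (List.nodup_range)
  intro a b hab
  have : (a : Int) + 1 = (b : Int) + 1 := hab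
  omega

lemma buildG_flatten_mem (n : Int) (pa : List Int) (hpre : Pre_solve n pa)
    (v : Int) (hv : v ∈ (buildG n pa).flatten) : 1 ≤ v ∧ v ≤ (pa.length : Int) := by
  have := (buildG_flatten_perm n pa hpre).mem_iff.mp hv
  simp only [List.mem_map, List.mem_range] at this
  obtain ⟨k, hk, rfl⟩ := this
  omega

lemma mem_chD_mem_flatten (g : List (List Int)) (u v : Int) (h0 : 0 ≤ u)
    (h1 : u < (g.length : Int)) (hv : v ∈ chD g u) : v ∈ g.flatten := by
  rw [chD_nonneg g u h0 h1] at hv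
  exact List.mem_flatten.mpr ⟨_, List.getElem_mem _, hv⟩

lemma parent_unique (g : List (List Int)) (hnd : g.flatten.Nodup) (u u' v : Int)
    (hu : 0 ≤ u ∧ u < (g.length : Int)) (hu' : 0 ≤ u' ∧ u' < (g.length : Int))
    (h : v ∈ chD g u) (h' : v ∈ chD g u') : u = u' := by
  rw [chD_nonneg g u hu.1 hu.2] at h
  rw [chD_nonneg g u' hu'.1 hu'.2] at h'
  by_contra hne
  have hpw := (List.nodup_flatten.mp hnd).2
  have hget := List.pairwise_iff_getElem.mp hpw
  rcases Nat.lt_or_ge u.toNat u'.toNat with hlt | hge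
  · exact hget u.toNat u'.toNat (by omega) (by omega) hlt h h'
  · have hlt : u'.toNat < u.toNat := by omega
    exact hget u'.toNat u.toNat (by omega) (by omega) hlt h' h

-- ---- facts about the levels ----

lemma levelCounts_eq_map (g : List (List Int)) :
    ∀ (fuel : Nat) (q : List Int),
      levelCounts g fuel q = (bfsLevels g fuel q).map (fun l => (l.length : Int)) := by
  intro fuel
  induction fuel with
  | zero => intro q; rfl
  | succ fuel ih =>
    intro q
    rcases q with _ | ⟨u, q⟩
    · rfl
    · simp only [levelCounts, bfsLevels, List.map_cons, ih]
      simp [PySem.List.len_eq]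

lemma bfs_cons (g : List (List Int)) (fuel : Nat) (q : List Int) (hf : fuel ≠ 0) (hq : q ≠ []) :
    bfsLevels g fuel q = q :: bfsLevels g (fuel - 1) (q.flatMap (fun w => chD g w)) := by
  rcases fuel with _ | fuel
  · omega
  rcases q with _ | ⟨u, q⟩
  · simp at hq
  · rfl

lemma bfs_getElem_zero (g : List (List Int)) (fuel : Nat) (q : List Int) (hf : fuel ≠ 0)
    (hq : q ≠ []) (h0 : 0 < (bfsLevels g fuel q).length) : (bfsLevels g fuel q)[0] = q := by
  rcases fuel with _ | fuel
  · omega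
  rcases q with _ | ⟨u, q⟩
  · simp at hq
  · rfl

lemma bfs_chain (g : List (List Int)) :
    ∀ (fuel : Nat) (q : List Int) (k : Nat) (h : k + 1 < (bfsLevels g fuel q).length),
      (bfsLevels g fuel q)[k + 1] =
        ((bfsLevels g fuel q)[k]'(by omega)).flatMap (fun w => chD g w) := by
  intro fuel
  induction fuel with
  | zero => intro q k h; simp [bfsLevels] at h
  | succ fuel ih =>
    intro q k h
    rcases q with _ | ⟨u, q⟩
    · simp [bfsLevels] at h
    · rcases k with _ | k
      · have h2 : 0 < (bfsLevels g fuel ((u :: q).flatMap (fun w => chD g w))).length := by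
          simp only [bfsLevels] at h; simpa using h
        have hne : (u :: q).flatMap (fun w => chD g w) ≠ [] := by
          intro hc
          rw [hc] at h2
          cases fuel <;> simp [bfsLevels] at h2
        have hfu : fuel ≠ 0 := by
          intro hc; rw [hc] at h2; simp [bfsLevels] at h2
        simp only [bfsLevels]
        simp only [List.getElem_cons_succ, List.getElem_cons_zero]
        rw [bfs_getElem_zero g fuel _ hfu hne h2]
      · simp only [bfsLevels] at h ⊢
        simpa using ih ((u :: q).flatMap (fun w => chD g w)) k (by simpa using h)

lemma bfs_ne_nil (g : List (List Int)) :
    ∀ (fuel : Nat) (q : List Int) (k : Nat) (h : k < (bfsLevels g fuel q).length),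
      (bfsLevels g fuel q)[k] ≠ [] := by
  intro fuel
  induction fuel with
  | zero => intro q k h; simp [bfsLevels] at h
  | succ fuel ih =>
    intro q k h
    rcases q with _ | ⟨u, q⟩
    · simp [bfsLevels] at h
    · rcases k with _ | k
      · simp [bfsLevels]
      · simp only [bfsLevels] at h ⊢
        simpa using ih _ k (by simpa using h)

-- ---- modular-sum plumbing ----

lemma foldModSum (h : Int → Int) :
    ∀ (xs : List Int) (a : Int), xs ≠ [] →
      xs.foldl (fun acc v => (acc + h v) % MODL) a = (a + (xs.map h).sum) % MODL := by
  intro xs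
  induction xs with
  | nil => intro a ha; simp at ha
  | cons x t ih =>
    intro a _
    rcases t with _ | ⟨y, t'⟩
    · simp
    · rw [List.foldl_cons, ih _ (by simp)]
      have hm : ∀ (p q : Int), (p % MODL + q) % MODL = (p + q) % MODL := by
        intro p q
        conv_lhs => rw [Int.add_emod, Int.emod_emod_of_dvd _ dvd_rfl, ← Int.add_emod]
      simp only [List.map_cons, List.sum_cons]
      rw [hm]
      ring_nf

lemma foldModSum0 (h : Int → Int) (xs : List Int) :
    xs.foldl (fun acc v => (acc + h v) % MODL) 0 = (xs.map h).sum % MODL := by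
  rcases xs with _ | ⟨x, t⟩
  · simp
  · rw [foldModSum h _ _ (by simp)]
    simp

lemma sum_map_mod (F : Int → Int) (xs : List Int) :
    (xs.map (fun u => F u % MODL)).sum % MODL = (xs.map F).sum % MODL := by
  induction xs with
  | nil => rfl
  | cons x t ih =>
    simp only [List.map_cons, List.sum_cons]
    rw [Int.add_emod, ih, Int.emod_emod_of_dvd _ dvd_rfl, ← Int.add_emod]

lemma sum_map_csub (S : Int → Int) (c : Int) (xs : List Int) :
    (xs.map (fun u => c - S u)).sum = (xs.length : Int) * c - (xs.map S).sum := by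
  induction xs with
  | nil => simp
  | cons x t ih =>
    simp only [List.map_cons, List.sum_cons, List.length_cons, ih]
    push_cast
    ring

-- ---- level structure under Pre_solve ----

lemma levels_elem (n : Int) (pa : List Int) (hpre : Pre_solve n pa) :
    ∀ (k : Nat) (hk : k < (bfsLevels (buildG n pa) n.toNat [0]).length),
      ∀ v ∈ (bfsLevels (buildG n pa) n.toNat [0])[k],
        (0 ≤ v ∧ v < n) ∧ (1 ≤ k → 1 ≤ v) := by
  obtain ⟨hn, hlen, hp⟩ := hpre
  have hfu : n.toNat ≠ 0 := by omega
  have hgl : (buildG n pa).length = n.toNat := buildG_length n pa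
  have hglI : ((buildG n pa).length : Int) = n := by omega
  intro k
  induction k with
  | zero =>
    intro hk v hv
    rw [bfs_getElem_zero _ _ _ hfu (by simp) (by omega)] at hv
    simp only [List.mem_singleton] at hv
    subst hv
    exact ⟨⟨le_refl 0, by omega⟩, by omega⟩
  | succ k ih =>
    intro hk v hv
    rw [bfs_chain _ _ _ k hk] at hv
    rw [List.mem_flatMap] at hv
    obtain ⟨u, hu, hvu⟩ := hv
    have hub := (ih (by omega) u hu).1
    have hvf := mem_chD_mem_flatten (buildG n pa) u v hub.1 (by omega) hvu
    have := buildG_flatten_mem n pa ⟨hn, hlen, hp⟩ v hvf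
    exact ⟨⟨by omega, by omega⟩, fun _ => by omega⟩

lemma levels_nodup (n : Int) (pa : List Int) (hpre : Pre_solve n pa) :
    ∀ (k : Nat) (hk : k < (bfsLevels (buildG n pa) n.toNat [0]).length),
      ((bfsLevels (buildG n pa) n.toNat [0])[k]).Nodup := by
  obtain ⟨hn, hlen, hp⟩ := hpre
  have hfu : n.toNat ≠ 0 := by omega
  have hgl : (buildG n pa).length = n.toNat := buildG_length n pa
  have hglI : ((buildG n pa).length : Int) = n := by omega
  have hgnd := buildG_flatten_nodup n pa ⟨hn, hlen, hp⟩
  intro k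
  induction k with
  | zero =>
    intro hk
    rw [bfs_getElem_zero _ _ _ hfu (by simp) (by omega)]
    simp
  | succ k ih =>
    intro hk
    rw [bfs_chain _ _ _ k hk]
    rw [List.flatMap_def, List.nodup_flatten]
    constructor
    · intro l hl
      rw [List.mem_map] at hl
      obtain ⟨u, hu, rfl⟩ := hl
      have hub := (levels_elem n pa ⟨hn, hlen, hp⟩ k (by omega) u hu).1
      rw [chD_nonneg _ _ hub.1 (by omega)]
      exact (List.nodup_flatten.mp hgnd).1 _ (List.getElem_mem _)
    · rw [List.pairwise_map]
      have hnd := ih (by omega)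
      rw [List.Nodup, List.pairwise_iff_getElem] at hnd
      rw [List.pairwise_iff_getElem]
      intro i j hi hj hij x hxi hxj
      have hbi := (levels_elem n pa ⟨hn, hlen, hp⟩ k (by omega) _ (List.getElem_mem hi)).1
      have hbj := (levels_elem n pa ⟨hn, hlen, hp⟩ k (by omega) _ (List.getElem_mem hj)).1
      have := parent_unique (buildG n pa) hgnd _ _ x
        ⟨hbi.1, by omega⟩ ⟨hbj.1, by omega⟩ hxi hxj
      exact hnd i j hi hj hij this

lemma levels_disjoint (n : Int) (pa : List Int) (hpre : Pre_solve n pa) :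
    ∀ (k k' : Nat) (hkk : k < k') (hk' : k' < (bfsLevels (buildG n pa) n.toNat [0]).length),
      ∀ v ∈ (bfsLevels (buildG n pa) n.toNat [0])[k]'(by omega),
        v ∉ (bfsLevels (buildG n pa) n.toNat [0])[k'] := by
  obtain ⟨hn, hlen, hp⟩ := hpre
  have hfu : n.toNat ≠ 0 := by omega
  have hgl : (buildG n pa).length = n.toNat := buildG_length n pa
  have hglI : ((buildG n pa).length : Int) = n := by omega
  have hgnd := buildG_flatten_nodup n pa ⟨hn, hlen, hp⟩
  intro k
  induction k with
  | zero =>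
    intro k' hkk hk' v hv hv'
    rw [bfs_getElem_zero _ _ _ hfu (by simp) (by omega)] at hv
    simp only [List.mem_singleton] at hv
    subst hv
    have := (levels_elem n pa ⟨hn, hlen, hp⟩ k' hk' 0 hv').2 (by omega)
    omega
  | succ k ih =>
    intro k' hkk hk' v hv hv'
    rcases k' with _ | k''
    · omega
    · rw [bfs_chain _ _ _ k (by omega)] at hv
      rw [bfs_chain _ _ _ k'' (by omega)] at hv'
      rw [List.mem_flatMap] at hv hv'
      obtain ⟨u, hu, hvu⟩ := hv
      obtain ⟨u', hu', hvu'⟩ := hv'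
      have hub := (levels_elem n pa ⟨hn, hlen, hp⟩ k (by omega) u hu).1
      have hub' := (levels_elem n pa ⟨hn, hlen, hp⟩ k'' (by omega) u' hu').1
      have heq := parent_unique (buildG n pa) hgnd u u' v
        ⟨hub.1, by omega⟩ ⟨hub'.1, by omega⟩ hvu hvu'
      subst heq
      exact ih k'' (by omega) (by omega) u hu hu'

-- ---- array-write folds ----

lemma writeFold (w : List Int → Int → Int) (RS : List Int)
    (hRS : ∀ r ∈ RS, 0 ≤ r) :
    ∀ (us : List Int) (f : List Int),
      us.Nodup →
      (∀ u ∈ us, 0 ≤ u ∧ u < (f.length : Int)) →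
      (∀ u ∈ us, u ∉ RS) →
      (∀ f₁ f₂, (∀ r ∈ RS, getf f₁ r = getf f₂ r) → ∀ u ∈ us, w f₁ u = w f₂ u) →
      (us.foldl (fun f u => PySem.List.pySetD f u (w f u)) f).length = f.length ∧
      (∀ v : Int, 0 ≤ v → v ∉ us →
        getf (us.foldl (fun f u => PySem.List.pySetD f u (w f u)) f) v = getf f v) ∧
      (∀ u ∈ us, getf (us.foldl (fun f u => PySem.List.pySetD f u (w f u)) f) u = w f u) := by
  intro us
  induction us with
  | nil =>
    intro f _ _ _ _
    exact ⟨rfl, fun v _ _ => rfl, by simp⟩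
  | cons u rest ih =>
    intro f hnd hval hdis hw
    have hu := hval u (by simp)
    have hset : PySem.List.pySetD f u (w f u) = f.set u.toNat (w f u) :=
      PySem.List.pySetD_of_nonneg f _ hu.1
    have hlen1 : (f.set u.toNat (w f u)).length = f.length := by simp
    obtain ⟨ihL, ihP, ihW⟩ := ih (f.set u.toNat (w f u))
      (by exact (List.nodup_cons.mp hnd).2)
      (by intro x hx; have := hval x (by simp [hx]); omega)
      (by intro x hx; exact hdis x (by simp [hx]))
      (by intro f₁ f₂ hagree x hx; exact hw f₁ f₂ hagree x (by simp [hx]))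
    have hagree1 : ∀ r ∈ RS, getf (f.set u.toNat (w f u)) r = getf f r := by
      intro r hr
      have hr0 := hRS r hr
      have hru : r ≠ u := by
        intro hc; exact hdis u (by simp) (hc ▸ hr)
      rw [getf_eq_getElem? _ _ hr0, getf_eq_getElem? _ _ hr0,
        List.getElem?_set_ne (by omega)]
    refine ⟨?_, ?_, ?_⟩
    · rw [List.foldl_cons, hset, ihL, hlen1]
    · intro v hv0 hvn
      rw [List.foldl_cons, hset, ihP v hv0 (by intro hc; exact hvn (by simp [hc]))]
      have hvu : v ≠ u := by intro hc; exact hvn (by simp [hc])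
      rw [getf_eq_getElem? _ _ hv0, getf_eq_getElem? _ _ hv0,
        List.getElem?_set_ne (by omega)]
    · intro x hx
      rcases List.mem_cons.mp hx with rfl | hxr
      · have hnotin : x ∉ rest := (List.nodup_cons.mp hnd).1
        rw [List.foldl_cons, hset, ihP x hu.1 hnotin, getf_eq_getElem? _ _ hu.1,
          List.getElem?_set_self (by omega)]
        rfl
      · rw [List.foldl_cons, hset, ihW x hxr]
        exact hw _ _ hagree1 x (by simp [hxr])

lemma initFold :
    ∀ (us : List Int) (f : List Int),
      (∀ u ∈ us, 1 ≤ u ∧ u < (f.length : Int)) →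
      (us.foldl (fun f u => if u ≠ 0 then PySem.List.pySetD f u 1 else f) f).length = f.length ∧
      (∀ v : Int, 0 ≤ v → v ∉ us →
        getf (us.foldl (fun f u => if u ≠ 0 then PySem.List.pySetD f u 1 else f) f) v = getf f v) ∧
      (∀ u ∈ us, getf (us.foldl (fun f u => if u ≠ 0 then PySem.List.pySetD f u 1 else f) f) u = 1) := by
  intro us
  induction us with
  | nil =>
    intro f _
    exact ⟨rfl, fun v _ _ => rfl, by simp⟩
  | cons u rest ih =>
    intro f hval
    have hu := hval u (by simp)
    have hguard : (if u ≠ 0 then PySem.List.pySetD f u 1 else f) = f.set u.toNat 1 := by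
      rw [if_pos (by omega : u ≠ 0), PySem.List.pySetD_of_nonneg f _ (by omega)]
    have hlen1 : (f.set u.toNat 1).length = f.length := by simp
    obtain ⟨ihL, ihP, ihW⟩ := ih (f.set u.toNat 1)
      (by intro x hx; have := hval x (by simp [hx]); omega)
    refine ⟨?_, ?_, ?_⟩
    · rw [List.foldl_cons, hguard, ihL, hlen1]
    · intro v hv0 hvn
      rw [List.foldl_cons, hguard, ihP v hv0 (by intro hc; exact hvn (by simp [hc]))]
      have hvu : v ≠ u := by intro hc; exact hvn (by simp [hc])
      rw [getf_eq_getElem? _ _ hv0, getf_eq_getElem? _ _ hv0,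
        List.getElem?_set_ne (by omega)]
    · intro x hx
      rcases List.mem_cons.mp hx with rfl | hxr
      · by_cases hxr : x ∈ rest
        · rw [List.foldl_cons, hguard]
          exact ihW x hxr
        · rw [List.foldl_cons, hguard, ihP x (by omega) hxr,
            getf_eq_getElem? _ _ (by omega : (0:Int) ≤ x),
            List.getElem?_set_self (by omega)]
          rfl
      · rw [List.foldl_cons, hguard]
        exact ihW x hxr

-- ---- one phase of A's DP loop ----

lemma phaseStep (g : List (List Int)) (N : Nat) (lvl next : List Int) (rest : List (List Int))
    (f : List Int)
    (hlen : f.length = N)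
    (hflat : next = lvl.flatMap (fun w => chD g w))
    (hnd : lvl.Nodup)
    (hval : ∀ u ∈ lvl, 0 ≤ u ∧ u < (N : Int))
    (hvnext : ∀ v ∈ next, 0 ≤ v)
    (hdisj : ∀ u ∈ lvl, u ∉ next)
    (hInv : ∀ v ∈ next, getf f v = HF g (next :: rest) v) :
    (lvl.foldl
        (fun fc u =>
          PySem.List.pySetD fc u
            ((1 + ((next.foldl (fun acc v => (acc + PySem.List.pyGetD f v 0) % MODL) 0)
                 - (chD g u).foldl (fun acc v => (acc + PySem.List.pyGetD fc v 0) % MODL) 0)) % MODL))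
        f).length = N ∧
    (∀ u ∈ lvl,
      getf (lvl.foldl
        (fun fc u =>
          PySem.List.pySetD fc u
            ((1 + ((next.foldl (fun acc v => (acc + PySem.List.pyGetD f v 0) % MODL) 0)
                 - (chD g u).foldl (fun acc v => (acc + PySem.List.pyGetD fc v 0) % MODL) 0)) % MODL))
        f) u = HF g (lvl :: next :: rest) u) := by
  have hTot : next.foldl (fun acc v => (acc + PySem.List.pyGetD f v 0) % MODL) 0
      = (next.map (HF g (next :: rest))).sum % MODL := by
    rw [PySem.List.foldl_congr_mem next _
      (fun acc v => (acc + HF g (next :: rest) v) % MODL) 0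
      (by intro acc v hv
          show _ = (acc + HF g (next :: rest) v) % MODL
          rw [← hInv v hv]; rfl)]
    exact foldModSum0 _ next
  have hSC : ∀ u ∈ lvl,
      (chD g u).foldl (fun acc v => (acc + PySem.List.pyGetD f v 0) % MODL) 0
        = ((chD g u).map (HF g (next :: rest))).sum % MODL := by
    intro u hu
    rw [PySem.List.foldl_congr_mem (chD g u) _
      (fun acc v => (acc + HF g (next :: rest) v) % MODL) 0
      (by intro acc v hv
          show _ = (acc + HF g (next :: rest) v) % MODL
          rw [← hInv v (hflat ▸ List.mem_flatMap.mpr ⟨u, hu, hv⟩)]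
          rfl)]
    exact foldModSum0 _ _
  obtain ⟨wL, wP, wW⟩ := writeFold
    (w := fun fc u =>
      ((1 + ((next.foldl (fun acc v => (acc + PySem.List.pyGetD f v 0) % MODL) 0)
          - (chD g u).foldl (fun acc v => (acc + PySem.List.pyGetD fc v 0) % MODL) 0)) % MODL))
    (RS := next) hvnext lvl f hnd (by intro u hu; have := hval u hu; omega) hdisj
    (by intro f₁ f₂ hagree u hu
        dsimp only
        have : (chD g u).foldl (fun acc v => (acc + PySem.List.pyGetD f₁ v 0) % MODL) 0
            = (chD g u).foldl (fun acc v => (acc + PySem.List.pyGetD f₂ v 0) % MODL) 0 := by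
          apply PySem.List.foldl_congr_mem
          intro acc v hv
          have := hagree v (hflat ▸ List.mem_flatMap.mpr ⟨u, hu, hv⟩)
          simp only [getf] at this
          rw [this]
        rw [this])
  refine ⟨by rw [wL, hlen], ?_⟩
  intro u hu
  rw [wW u hu, hTot, hSC u hu]
  rfl

-- ---- the level sum telescopes to B's scalar recurrence ----

lemma sum_map_flat (h : Int → Int) (ch : Int → List Int) (lvl : List Int) :
    ((lvl.flatMap ch).map h).sum = (lvl.map (fun u => ((ch u).map h).sum)).sum := by
  induction lvl with
  | nil => simp
  | cons x t ih => simp [ih]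

lemma sum_map_HF_single (g : List (List Int)) (lvl : List (List Int)) (xs : List Int)
    (hsing : ∀ u, HF g lvl u = 1) :
    (xs.map (HF g lvl)).sum = (xs.length : Int) := by
  induction xs with
  | nil => simp
  | cons x t ih =>
    simp [hsing, ih]
    ring

lemma sumLevel (g : List (List Int)) (lvl next : List Int) (rest : List (List Int))
    (hflat : next = lvl.flatMap (fun w => chD g w)) :
    (lvl.map (HF g (lvl :: next :: rest))).sum % MODL =
      ((lvl.length : Int) + ((lvl.length : Int) - 1)
          * ((next.map (HF g (next :: rest))).sum % MODL)) % MODL := by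
  have hHF : lvl.map (HF g (lvl :: next :: rest))
      = lvl.map (fun u =>
          (1 + ((next.map (HF g (next :: rest))).sum % MODL
              - ((chD g u).map (HF g (next :: rest))).sum % MODL)) % MODL) := by
    apply List.map_congr_left
    intro u hu
    rfl
  set h := HF g (next :: rest) with hh
  set T := (next.map h).sum % MODL with hT
  set Tf := (next.map h).sum with hTf
  set Sf := (lvl.map (fun u => ((chD g u).map h).sum)).sum with hSf
  have hTT : Int.ModEq MODL T Tf := Int.emod_emod_of_dvd _ dvd_rfl
  have hSfT : Sf = Tf := by
    rw [hSf, hTf, hflat, ← sum_map_flat]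
  rw [hHF, sum_map_mod]
  have hre : (lvl.map (fun u =>
      1 + (T - ((chD g u).map h).sum % MODL))).sum
      = (lvl.map (fun u => (1 + T) - (((chD g u).map h).sum % MODL))).sum := by
    apply congrArg
    apply List.map_congr_left
    intro u hu
    ring
  rw [hre, sum_map_csub]
  have hSm : Int.ModEq MODL (lvl.map (fun u => ((chD g u).map h).sum % MODL)).sum Sf :=
    sum_map_mod (fun u => ((chD g u).map h).sum) lvl
  have key : Int.ModEq MODL
      ((lvl.length : Int) * (1 + T) - (lvl.map (fun u => ((chD g u).map h).sum % MODL)).sum)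
      ((lvl.length : Int) + ((lvl.length : Int) - 1) * T) := by
    calc (lvl.length : Int) * (1 + T) - (lvl.map (fun u => ((chD g u).map h).sum % MODL)).sum
        ≡ (lvl.length : Int) * (1 + Tf) - Sf [ZMOD MODL] :=
          Int.ModEq.sub (Int.ModEq.mul_left _ (Int.ModEq.add_left 1 hTT)) hSm
      _ = (lvl.length : Int) + ((lvl.length : Int) - 1) * Tf := by rw [hSfT]; ring
      _ ≡ (lvl.length : Int) + ((lvl.length : Int) - 1) * T [ZMOD MODL] :=
          Int.ModEq.add_left _ (Int.ModEq.mul_left _ hTT.symm)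
  exact key

-- ---- descending range ----

lemma pyRange_down_eq (a : Int) :
    PySem.List.pyRange a 0 (-1) = (List.range a.toNat).map (fun k : Nat => a - (k : Int)) := by
  simp only [PySem.List.pyRange]
  rw [if_neg (by omega : ¬ (-1:Int) = 0), if_neg (by omega : ¬ (0:Int) < -1)]
  by_cases h3 : (0:Int) < a
  · rw [if_pos h3]
    have h4 : (a - 0 + - -1 - 1) / - -1 = a := by norm_num
    rw [h4]
    apply List.map_congr_left
    intro x hx
    ring
  · rw [if_neg h3]
    have : a.toNat = 0 := by omega
    simp [this]

lemma pyRange_down (a : Int) (ha : 1 ≤ a) :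
    PySem.List.pyRange a 0 (-1) = a :: PySem.List.pyRange (a - 1) 0 (-1) := by
  rw [pyRange_down_eq, pyRange_down_eq]
  have hq : a.toNat = (a - 1).toNat + 1 := by omega
  rw [hq, List.range_succ_eq_map]
  simp only [List.map_cons, List.map_map, Function.comp_def]
  refine congrArg₂ List.cons (by simp) ?_
  apply List.map_congr_left
  intro x hx
  push_cast
  ring

lemma pyRange_down_nil (a : Int) (ha : a ≤ 0) : PySem.List.pyRange a 0 (-1) = [] := by
  rw [pyRange_down_eq]
  have : a.toNat = 0 := by omega
  simp [this]

-- ---- the main descending loop, both programs in lockstep ----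

lemma down (g : List (List Int)) (N : Nat) (L : List (List Int))
    (hchain : ∀ (k : Nat) (h : k + 1 < L.length),
      L[k + 1] = (L[k]'(by omega)).flatMap (fun w => chD g w))
    (hnd : ∀ (k : Nat) (h : k < L.length), (L[k]).Nodup)
    (hval : ∀ (k : Nat) (h : k < L.length), ∀ v ∈ L[k], 0 ≤ v ∧ v < (N : Int))
    (hdisj : ∀ (k : Nat) (h : k + 1 < L.length), ∀ v ∈ L[k]'(by omega), v ∉ L[k + 1]) :
    ∀ (l : Nat) (hl : l + 1 < L.length) (f : List Int) (S : Int),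
      f.length = N →
      (∀ v ∈ L[l + 1], getf f v = HF g (L.drop (l + 1)) v) →
      S = ((L[l + 1]).map (HF g (L.drop (l + 1)))).sum % MODL →
      (((PySem.List.pyRange (l : Int) 0 (-1)).foldl
          (fun f lI =>
            (PySem.List.pyGetD L lI []).foldl
              (fun fc u =>
                PySem.List.pySetD fc u
                  ((1 + ((PySem.List.pyGetD L (lI + 1) []).foldl
                        (fun acc v => (acc + PySem.List.pyGetD f v 0) % MODL) 0
                      - (chD g u).foldl
                        (fun acc v => (acc + PySem.List.pyGetD fc v 0) % MODL) 0)) % MODL))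
              f)
          f).length = N ∧
      (∀ v ∈ L[1]'(by omega),
        getf ((PySem.List.pyRange (l : Int) 0 (-1)).foldl
          (fun f lI =>
            (PySem.List.pyGetD L lI []).foldl
              (fun fc u =>
                PySem.List.pySetD fc u
                  ((1 + ((PySem.List.pyGetD L (lI + 1) []).foldl
                        (fun acc v => (acc + PySem.List.pyGetD f v 0) % MODL) 0
                      - (chD g u).foldl
                        (fun acc v => (acc + PySem.List.pyGetD fc v 0) % MODL) 0)) % MODL))
              f)
          f) v = HF g (L.drop 1) v) ∧
      ((PySem.List.pyRange (l : Int) 0 (-1)).foldl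
          (fun s lI =>
            (PySem.List.pyGetD (L.map (fun lv => (lv.length : Int))) lI 0
              + (PySem.List.pyGetD (L.map (fun lv => (lv.length : Int))) lI 0 - 1) * s) % MODL)
          S = ((L[1]'(by omega)).map (HF g (L.drop 1))).sum % MODL)) := by
  intro l
  induction l with
  | zero =>
    intro hl f S hlen hInv hS
    rw [pyRange_down_nil ((0 : Nat) : Int) (by simp)]
    simp only [List.foldl_nil]
    exact ⟨hlen, hInv, hS⟩
  | succ l ih =>
    intro hl f S hlen hInv hS
    have hl2 : l + 2 < L.length := by omega
    have hcast : (((l + 1 : Nat)) : Int) - 1 = (l : Int) := by push_cast; ring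
    rw [pyRange_down (((l + 1 : Nat)) : Int) (by push_cast; omega), hcast]
    simp only [List.foldl_cons]
    have hidx1 : PySem.List.pyGetD L (((l + 1 : Nat)) : Int) [] = L[l + 1]'(by omega) := by
      rw [PySem.List.pyGetD_natCast]
      exact List.getD_eq_getElem L [] (by omega)
    have hidx2 : PySem.List.pyGetD L ((((l + 1 : Nat)) : Int) + 1) [] = L[l + 2]'(by omega) := by
      have hc : (((l + 1 : Nat)) : Int) + 1 = ((l + 2 : Nat) : Int) := by push_cast; ring
      rw [hc, PySem.List.pyGetD_natCast]
      exact List.getD_eq_getElem L [] (by omega)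
    have hcnt : PySem.List.pyGetD (L.map (fun lv => (lv.length : Int))) (((l + 1 : Nat)) : Int) 0
        = ((L[l + 1]'(by omega)).length : Int) := by
      rw [PySem.List.pyGetD_natCast]
      rw [List.getD_eq_getElem _ 0 (by simp; omega)]
      exact List.getElem_map _
    have hdrop2 : L.drop (l + 2) = (L[l + 2]'(by omega)) :: L.drop (l + 3) :=
      List.drop_eq_getElem_cons (by omega)
    have hdrop1 : L.drop (l + 1) =
        (L[l + 1]'(by omega)) :: (L[l + 2]'(by omega)) :: L.drop (l + 3) := by
      rw [List.drop_eq_getElem_cons (by omega : l + 1 < L.length)]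
      exact congrArg (fun t => (L[l + 1]'(by omega)) :: t) hdrop2
    have hflat : (L[l + 2]'(by omega)) = (L[l + 1]'(by omega)).flatMap (fun w => chD g w) := by
      have := hchain (l + 1) (by omega)
      simpa using this
    have hInv2 : ∀ v ∈ L[l + 2]'(by omega), getf f v
        = HF g ((L[l + 2]'(by omega)) :: L.drop (l + 3)) v := by
      intro v hv
      rw [← hdrop2]
      exact hInv v (by simpa using hv)
    obtain ⟨pL, pW⟩ := phaseStep g N (L[l + 1]'(by omega)) (L[l + 2]'(by omega)) (L.drop (l + 3))
      f hlen hflat (hnd (l + 1) (by omega)) (hval (l + 1) (by omega))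
      (fun v hv => (hval (l + 2) (by omega) v hv).1)
      (by intro u hu
          have := hdisj (l + 1) (by omega) u hu
          simpa using this)
      hInv2
    rw [hidx1, hidx2, hcnt]
    have hS' : ((L[l + 1]'(by omega)).length : Int) % MODL = ((L[l+1]'(by omega)).length : Int) % MODL := rfl
    refine ih (by omega) _ _ pL ?_ ?_
    · intro v hv
      rw [hdrop1]
      exact pW v hv
    · rw [hdrop1]
      rw [sumLevel g _ _ _ hflat]
      have hSin : S = ((L[l + 2]'(by omega)).map
          (HF g ((L[l + 2]'(by omega)) :: L.drop (l + 3)))).sum % MODL := by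
        rw [← hdrop2]
        simpa using hS
      rw [hSin]

-- ===== VERDICT (by name: the statement is the Claim_ definition above) =====
theorem solve_spec : Claim_equal_solve := by
  intro n pa hdom hpre
  obtain ⟨hn, hlenp, hp⟩ := hpre
  unfold Spec_solve
  have hfu : n.toNat ≠ 0 := by omega
  have hmk : mkGraph = buildG := rfl
  have hgl : (buildG n pa).length = n.toNat := buildG_length n pa
  show solve n pa = solve_alt n pa
  simp only [solve, solve_alt, hmk, modM, PySem.List.len_eq,
    levelCounts_eq_map, List.length_map]
  set G := buildG n pa with hG
  set L := bfsLevels G n.toNat [0] with hLdef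
  have hLlen1 : 1 ≤ L.length := by
    rw [hLdef, bfs_cons G n.toNat [0] hfu (by simp)]
    simp
  by_cases hm : L.length < 2
  · rw [if_neg (by omega), if_pos (by omega)]
    show (1:Int) % MODL = 1
    decide
  · rw [if_pos (by omega), if_neg (by omega)]
    have hpre' : Pre_solve n pa := ⟨hn, hlenp, hp⟩
    have hchainL : ∀ (k : Nat) (h : k + 1 < L.length),
        L[k + 1] = (L[k]'(by omega)).flatMap (fun w => chD G w) :=
      fun k h => bfs_chain G n.toNat [0] k h
    have hndL : ∀ (k : Nat) (h : k < L.length), (L[k]).Nodup :=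
      fun k h => levels_nodup n pa hpre' k h
    have hlevE : ∀ (k : Nat) (h : k < L.length), ∀ v ∈ L[k],
        (0 ≤ v ∧ v < n) ∧ (1 ≤ k → 1 ≤ v) :=
      fun k h v hv => levels_elem n pa hpre' k h v hv
    have hvalL : ∀ (k : Nat) (h : k < L.length), ∀ v ∈ L[k], 0 ≤ v ∧ v < ((n.toNat : Nat) : Int) := by
      intro k h v hv
      have := (hlevE k h v hv).1
      constructor
      · omega
      · omega
    have hdisjL : ∀ (k : Nat) (h : k + 1 < L.length), ∀ v ∈ L[k]'(by omega), v ∉ L[k + 1] :=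
      fun k h v hv hv' => levels_disjoint n pa hpre' k (k + 1) (by omega) h v hv hv'
    have hidxlast : PySem.List.pyGetD L ((L.length : Int) - 1) [] = L[L.length - 1]'(by omega) := by
      rw [show ((L.length : Int) - 1) = ((L.length - 1 : Nat) : Int) by omega,
        PySem.List.pyGetD_natCast]
      exact List.getD_eq_getElem _ _ (by omega)
    have hcntlast : PySem.List.pyGetD (L.map (fun lv => (lv.length : Int))) ((L.length : Int) - 1) 0
        = ((L[L.length - 1]'(by omega)).length : Int) := by
      rw [show ((L.length : Int) - 1) = ((L.length - 1 : Nat) : Int) by omega,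
        PySem.List.pyGetD_natCast, List.getD_eq_getElem _ 0 (by simp; omega)]
      exact List.getElem_map _
    rw [hidxlast, hcntlast]
    obtain ⟨iL, iP, iW⟩ := initFold (L[L.length - 1]'(by omega)) (List.replicate n.toNat 0)
      (by intro u hu
          have h1 := hlevE (L.length - 1) (by omega) u hu
          have h2 := h1.2 (by omega)
          have h3 := h1.1
          rw [List.length_replicate]
          constructor <;> omega)
    have hdroplast : L.drop (L.length - 1) = [L[L.length - 1]'(by omega)] := by
      rw [List.drop_eq_getElem_cons (by omega)]
      rw [show L.length - 1 + 1 = L.length by omega, List.drop_length]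
    have hInvLast : ∀ v ∈ L[L.length - 1]'(by omega),
        getf ((L[L.length - 1]'(by omega)).foldl
          (fun f u => if u ≠ 0 then PySem.List.pySetD f u 1 else f)
          (List.replicate n.toNat 0)) v = HF G (L.drop (L.length - 1)) v := by
      intro v hv
      rw [iW v hv, hdroplast]
      rfl
    have hSlast : ((L[L.length - 1]'(by omega)).length : Int) % MODL
        = ((L[L.length - 1]'(by omega)).map (HF G (L.drop (L.length - 1)))).sum % MODL := by
      rw [hdroplast, sum_map_HF_single _ _ _ (fun u => rfl)]
    rw [show ((L.length : Int) - 2) = ((L.length - 2 : Nat) : Int) by omega]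
    have he : L.length - 2 + 1 = L.length - 1 := by omega
    obtain ⟨dL, dInv, dS⟩ := down G n.toNat L hchainL hndL hvalL hdisjL (L.length - 2)
      (by omega)
      ((L[L.length - 1]'(by omega)).foldl
        (fun f u => if u ≠ 0 then PySem.List.pySetD f u 1 else f)
        (List.replicate n.toNat 0))
      (((L[L.length - 1]'(by omega)).length : Int) % MODL)
      (by rw [iL, List.length_replicate])
      (by simp only [he]; exact hInvLast)
      (by simp only [he]; exact hSlast)
    have hidx1 : PySem.List.pyGetD L 1 [] = L[1]'(by omega) := by
      rw [show (1 : Int) = ((1 : Nat) : Int) by norm_num, PySem.List.pyGetD_natCast]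
      exact List.getD_eq_getElem _ _ (by omega)
    rw [hidx1]
    have hne1 : L[1]'(by omega) ≠ [] := bfs_ne_nil G n.toNat [0] 1 (show 1 < L.length by omega)
    rw [PySem.List.foldl_congr_mem (L[1]'(by omega)) _
      (fun a v => (a + HF G (L.drop 1) v) % MODL) 1
      (by intro acc v hv
          show _ = (acc + HF G (L.drop 1) v) % MODL
          rw [← dInv v hv]
          rfl)]
    rw [foldModSum _ _ _ hne1, dS]
    rw [Int.emod_emod_of_dvd _ dvd_rfl]
    exact (Int.ModEq.add_left 1 (Int.emod_emod_of_dvd _ dvd_rfl)).symm
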